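-- pv_equiv track=rewrite | github.com/KiyonoKara/CJK-Script-AI | utils.py | create_eng_to_rads
-- ===== SOURCE A (Python) =====
-- def create_eng_to_rads(kanji_to_rads, eng_to_kanji) -> dict[str, list[str]]:
--     """
--     Use the kanji to radical dictionary and English to
--     Character dictionary to construct the English to radical dictionary
--     :param kanji_to_rads:
--     :param eng_to_kanji:
--     :return: dict of English words to radicals
--     """
--
--     eng_to_rads = dict()
--     for eng_word in eng_to_kanji:
--         # Create new dict entry for English word
--         eng_to_rads[eng_word] = []
--         for kanji in eng_to_kanji[eng_word]:
--             # Add unique radicals to English word entry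
--             if kanji in kanji_to_rads:
--                 for rad in kanji_to_rads[kanji]:
--                     if rad not in eng_to_rads[eng_word]:
--                         eng_to_rads[eng_word].append(rad)
--     return eng_to_rads
-- ===== SOURCE B (Python) =====
-- def create_eng_to_rads(kanji_to_rads, eng_to_kanji) -> dict[str, list[str]]:
--     """
--     Two staged passes per word: flatten all radicals of its mapped kanji,
--     then remove duplicates by repeated filtering: take the head, delete every
--     later copy of it from the remainder, repeat. No membership test against
--     the growing output is ever made.
--     """
--     eng_to_rads = {}
--     for word, kanjis in eng_to_kanji.items():
--         flat = [r for k in kanjis if k in kanji_to_rads for r in kanji_to_rads[k]]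
--         uniq = []
--         while flat:
--             head = flat[0]
--             uniq.append(head)
--             flat = [r for r in flat[1:] if r != head]
--         eng_to_rads[word] = uniq
--     return eng_to_rads
-- ===== Notes on version B (the rewrite author's own statement) =====
-- stated objective: alternative
-- what changed: Per word B first flattens all radicals in one pass and then deduplicates by repeatedly taking the head and filtering every later copy of it out of the remainder, so no membership test against the growing result list exists, unlike A's interleaved check-and-append into a mutated dict entry.
import Mathlib
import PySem

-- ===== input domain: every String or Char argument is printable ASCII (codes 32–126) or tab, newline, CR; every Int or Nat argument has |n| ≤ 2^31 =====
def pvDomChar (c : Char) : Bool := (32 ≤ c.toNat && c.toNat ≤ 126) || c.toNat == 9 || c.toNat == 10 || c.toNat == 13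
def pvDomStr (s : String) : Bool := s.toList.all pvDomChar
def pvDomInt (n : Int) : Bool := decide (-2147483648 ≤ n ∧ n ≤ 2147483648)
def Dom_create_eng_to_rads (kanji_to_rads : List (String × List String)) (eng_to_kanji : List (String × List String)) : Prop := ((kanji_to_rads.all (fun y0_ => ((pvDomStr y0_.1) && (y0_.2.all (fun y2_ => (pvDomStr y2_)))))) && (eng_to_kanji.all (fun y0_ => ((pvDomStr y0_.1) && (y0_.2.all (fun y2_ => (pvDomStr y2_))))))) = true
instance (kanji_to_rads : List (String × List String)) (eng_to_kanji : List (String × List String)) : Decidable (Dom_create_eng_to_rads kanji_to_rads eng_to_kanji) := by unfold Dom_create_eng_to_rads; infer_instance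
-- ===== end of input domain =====

-- B replaces A's interleaved check-and-append by two staged passes per word: flatten all radicals,
-- then deduplicate by repeatedly taking the head and filtering its later copies out of the remainder
-- (no membership test against the growing output). Alternative decomposition, same cost class.

-- ===== PORT A =====
-- Literal port of A: build eng_to_rads by iterating the dict keys, creating an empty entry,
-- then check-and-append each radical of each mapped kanji.
def create_eng_to_rads (kanji_to_rads : List (String × List String)) (eng_to_kanji : List (String × List String)) : List (String × List String) :=
  let ktr : PySem.Dict String (List String) := PySem.Dict.ofList kanji_to_rads
  let etk : PySem.Dict String (List String) := PySem.Dict.ofList eng_to_kanji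
  let eng_to_rads : PySem.Dict String (List String) :=
    etk.keys.foldl (fun etr eng_word =>
      let etr := etr.insert eng_word []
      (etk.getD eng_word []).foldl (fun etr kanji =>
        if ktr.contains kanji then
          (ktr.getD kanji []).foldl (fun etr rad =>
            if (etr.getD eng_word []).contains rad then etr
            else etr.insert eng_word ((etr.getD eng_word []) ++ [rad])) etr
        else etr) etr) PySem.Dict.empty
  eng_to_rads.items

-- ===== PORT B =====
-- B's while loop: take the head, append it, filter every later copy out of the remainder.
def uniqByFilter (xs : List String) : List String :=
  match xs with
  | [] => []
  | x :: rest => x :: uniqByFilter (rest.filter (fun y => y ≠ x))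
termination_by xs.length
decreasing_by
  exact Nat.lt_succ_of_le (by simpa using (List.length_filter_le _ rest.attach).trans (le_of_eq List.length_attach))

-- Literal port of B: per (word, kanjis) item, flatten the radicals in one pass, dedup them with the
-- repeated-filter loop, and insert the finished entry into the result dict.
def create_eng_to_rads_alt (kanji_to_rads : List (String × List String)) (eng_to_kanji : List (String × List String)) : List (String × List String) :=
  let ktr : PySem.Dict String (List String) := PySem.Dict.ofList kanji_to_rads
  let out : PySem.Dict String (List String) :=
    (PySem.Dict.ofList eng_to_kanji : PySem.Dict String (List String)).items.foldl (fun d p =>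
      let flat := p.2.flatMap (fun kanji => if ktr.contains kanji then ktr.getD kanji [] else [])
      d.insert p.1 (uniqByFilter flat)) PySem.Dict.empty
  out.items

-- ===== PRECONDITION & SPEC =====
def Spec_create_eng_to_rads (kanji_to_rads : List (String × List String)) (eng_to_kanji : List (String × List String)) (out : List (String × List String)) : Prop := out = create_eng_to_rads_alt kanji_to_rads eng_to_kanji
instance (kanji_to_rads : List (String × List String)) (eng_to_kanji : List (String × List String)) (out : List (String × List String)) : Decidable (Spec_create_eng_to_rads kanji_to_rads eng_to_kanji out) := by unfold Spec_create_eng_to_rads; infer_instance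

-- ===== CLAIM (what is proved, stated in full; the proofs are below) =====
def Claim_equal_create_eng_to_rads : Prop := ∀ (kanji_to_rads : List (String × List String)) (eng_to_kanji : List (String × List String)), Dom_create_eng_to_rads kanji_to_rads eng_to_kanji → Spec_create_eng_to_rads kanji_to_rads eng_to_kanji (create_eng_to_rads kanji_to_rads eng_to_kanji)

-- ===== LEMMAS AND PROOFS =====

-- Overwriting the same key twice equals one overwrite.
theorem dict_insert_insert {κ ν : Type} [BEq κ] [LawfulBEq κ] (d : PySem.Dict κ ν) (k : κ) (a b : ν) :
    (d.insert k a).insert k b = d.insert k b := by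
  apply PySem.Dict.ext
  rw [PySem.Dict.items_insert_of_contains _ b (PySem.Dict.contains_insert_self d k a)]
  by_cases hc : d.contains k
  · rw [PySem.Dict.items_insert_of_contains d a hc, PySem.Dict.items_insert_of_contains d b hc,
      List.map_map]
    apply List.map_congr_left
    intro p _
    by_cases h : p.1 = k <;> simp [h]
  · have hc' : d.contains k = false := by simpa using hc
    rw [PySem.Dict.items_insert_of_not_contains d a hc',
      PySem.Dict.items_insert_of_not_contains d b hc', List.map_append]
    congr 1
    · trans (d.items.map id)
      · apply List.map_congr_left
        intro p hp
        have hmem : p.1 ∈ d.keys := PySem.Dict.mem_keys_of_mem_items d hp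
        have hne : p.1 ≠ k := fun h =>
          hc ((PySem.Dict.contains_iff_mem_keys d k).mpr (h ▸ hmem))
        simp [hne]
      · simp
    · simp

-- A's radical loop on a dict whose entry at w is acc performs one Set.update of acc.
theorem radLoop_eq {d : PySem.Dict String (List String)} (w : String) (acc : List String) (rads : List String) :
    rads.foldl (fun etr rad =>
        if (etr.getD w []).contains rad then etr
        else etr.insert w ((etr.getD w []) ++ [rad])) (d.insert w acc)
      = d.insert w (PySem.Set.update acc rads) := by
  induction rads generalizing acc with
  | nil => simp [PySem.Set.update]
  | cons r rs ih =>
    simp only [List.foldl_cons, PySem.Dict.getD_insert_self]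
    by_cases h : acc.contains r
    · rw [if_pos h, ih acc]
      have h' : r ∈ acc := by simpa using h
      congr 1
      simp [PySem.Set.update, PySem.Set.add, h']
    · rw [if_neg h, dict_insert_insert, ih (acc ++ [r])]
      have h' : r ∉ acc := by simpa using h
      congr 1
      simp [PySem.Set.update, PySem.Set.add, h']

-- A's kanji loop on a dict whose entry at w is acc is a pure fold on that entry.
theorem kanjiLoop_eq (ktr : PySem.Dict String (List String)) {d : PySem.Dict String (List String)} (w : String) (acc : List String) (kanjis : List String) :
    kanjis.foldl (fun etr kanji =>
        if ktr.contains kanji then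
          (ktr.getD kanji []).foldl (fun etr rad =>
            if (etr.getD w []).contains rad then etr
            else etr.insert w ((etr.getD w []) ++ [rad])) etr
        else etr) (d.insert w acc)
      = d.insert w (kanjis.foldl (fun acc kanji =>
          if ktr.contains kanji then PySem.Set.update acc (ktr.getD kanji []) else acc) acc) := by
  induction kanjis generalizing acc with
  | nil => rfl
  | cons k ks ih =>
    simp only [List.foldl_cons]
    by_cases h : ktr.contains k
    · rw [if_pos h, if_pos h, radLoop_eq, ih]
    · rw [if_neg h, if_neg h, ih]

-- The per-word value A computes, as a pure fold.
def wordVal (ktr : PySem.Dict String (List String)) (kanjis : List String) : List String :=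
  kanjis.foldl (fun acc kanji =>
    if ktr.contains kanji then PySem.Set.update acc (ktr.getD kanji []) else acc) []

-- A's outer loop over fresh keys appends one finished item per key.
theorem outerLoop_items (ktr etk : PySem.Dict String (List String)) (ws : List String) (d : PySem.Dict String (List String))
    (hn : ws.Nodup) (hdisj : ∀ w ∈ ws, w ∉ d.keys) :
    (ws.foldl (fun etr eng_word =>
        (etk.getD eng_word []).foldl (fun etr kanji =>
          if ktr.contains kanji then
            (ktr.getD kanji []).foldl (fun etr rad =>
              if (etr.getD eng_word []).contains rad then etr
              else etr.insert eng_word ((etr.getD eng_word []) ++ [rad])) etr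
          else etr) (etr.insert eng_word [])) d).items
      = d.items ++ ws.map (fun w => (w, wordVal ktr (etk.getD w []))) := by
  induction ws generalizing d with
  | nil => simp
  | cons w ws ih =>
    simp only [List.foldl_cons, List.map_cons]
    rw [kanjiLoop_eq]
    have hcw : d.contains w = false := by
      have := hdisj w (by simp)
      rw [Bool.eq_false_iff]
      intro hc
      exact this ((PySem.Dict.contains_iff_mem_keys d w).mp hc)
    rw [ih _ (hn.of_cons) ?_]
    · rw [PySem.Dict.items_insert_of_not_contains d _ hcw, List.append_assoc]
      rfl
    · intro v hv
      rw [PySem.Dict.keys_insert_of_not_contains d _ hcw]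
      simp only [List.mem_append, List.mem_singleton]
      rintro (hk | rfl)
      · exact hdisj v (by simp [hv]) hk
      · exact (List.nodup_cons.mp hn).1 hv

-- The pure fold from acc is one Set.update of acc by the flattened radical list.
theorem wordVal_from (ktr : PySem.Dict String (List String)) (kanjis : List String) (acc : List String) :
    kanjis.foldl (fun acc kanji =>
        if ktr.contains kanji then PySem.Set.update acc (ktr.getD kanji []) else acc) acc
      = PySem.Set.update acc (kanjis.flatMap (fun kanji =>
          if ktr.contains kanji then ktr.getD kanji [] else [])) := by
  induction kanjis generalizing acc with
  | nil => rfl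
  | cons k ks ih =>
    simp only [List.foldl_cons, List.flatMap_cons]
    by_cases h : ktr.contains k
    · rw [if_pos h, if_pos h, ih]
      simp [PySem.Set.update, List.foldl_append]
    · rw [if_neg h, if_neg h, ih]
      simp

-- Unfolding lemma for uniqByFilter on a cons.
theorem uniq_cons (x : String) (xs : List String) :
    uniqByFilter (x :: xs) = x :: uniqByFilter (xs.filter (fun y => y ≠ x)) := by
  rw [uniqByFilter]

-- Set.update of acc appends the repeated-filter dedup of the not-yet-seen elements.
theorem update_eq_append_uniq (l acc : List String) :
    PySem.Set.update acc l = acc ++ uniqByFilter (l.filter (fun y => !acc.contains y)) := by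
  induction l generalizing acc with
  | nil => simp [PySem.Set.update, uniqByFilter]
  | cons x xs ih =>
    have hstep : PySem.Set.update acc (x :: xs) = PySem.Set.update (PySem.Set.add acc x) xs := rfl
    by_cases hx : acc.contains x
    · have hmem : x ∈ acc := by simpa using hx
      rw [hstep]
      have : PySem.Set.add acc x = acc := by simp [PySem.Set.add, hmem]
      rw [this, ih]
      simp [hmem]
    · have hxf : acc.contains x = false := by simpa using hx
      have hnmem : x ∉ acc := by simpa using hxf
      rw [hstep]
      have hadd : PySem.Set.add acc x = acc ++ [x] := by simp [PySem.Set.add, hnmem]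
      rw [hadd, ih]
      have hfil : xs.filter (fun y => !(acc ++ [x]).contains y)
          = (xs.filter (fun y => !acc.contains y)).filter (fun y => decide (y ≠ x)) := by
        rw [List.filter_filter]
        apply List.filter_congr
        intro y _
        by_cases h : y = x <;> simp [h, hnmem]
      rw [hfil]
      have hcons : List.filter (fun y => !acc.contains y) (x :: xs)
          = x :: xs.filter (fun y => !acc.contains y) := by
        simp [hnmem]
      rw [hcons, uniq_cons]
      simp

-- A's per-word value is B's repeated-filter dedup of the flattened list.
theorem wordVal_eq_uniq (ktr : PySem.Dict String (List String)) (kanjis : List String) :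
    wordVal ktr kanjis
      = uniqByFilter (kanjis.flatMap (fun kanji =>
          if ktr.contains kanji then ktr.getD kanji [] else [])) := by
  rw [wordVal, wordVal_from, update_eq_append_uniq]
  simp

-- Folding fresh-keyed items into a dict appends one item per pair.
theorem items_foldl_insert_fresh (l : List (String × List String)) (f : String × List String → List String)
    (d : PySem.Dict String (List String)) (hn : (l.map Prod.fst).Nodup) (hdisj : ∀ p ∈ l, p.1 ∉ d.keys) :
    (l.foldl (fun d p => d.insert p.1 (f p)) d).items = d.items ++ l.map (fun p => (p.1, f p)) := by
  induction l generalizing d with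
  | nil => simp
  | cons q l ih =>
    simp only [List.foldl_cons, List.map_cons] at *
    have hcq : d.contains q.1 = false := by
      have := hdisj q (by simp)
      rw [Bool.eq_false_iff]
      intro hc
      exact this ((PySem.Dict.contains_iff_mem_keys d q.1).mp hc)
    rw [ih _ hn.of_cons ?_]
    · rw [PySem.Dict.items_insert_of_not_contains d _ hcq, List.append_assoc]
      simp
    · intro p hp
      rw [PySem.Dict.keys_insert_of_not_contains d _ hcq]
      simp only [List.mem_append, List.mem_singleton]
      rintro (hk | h1)
      · exact hdisj p (by simp [hp]) hk
      · exact (List.nodup_cons.mp hn).1 (h1 ▸ List.mem_map_of_mem hp)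

theorem main_eq (kanji_to_rads eng_to_kanji : List (String × List String)) :
    create_eng_to_rads kanji_to_rads eng_to_kanji = create_eng_to_rads_alt kanji_to_rads eng_to_kanji := by
  unfold create_eng_to_rads create_eng_to_rads_alt
  set ktr := (PySem.Dict.ofList kanji_to_rads : PySem.Dict String (List String)) with hktr
  set etk := (PySem.Dict.ofList eng_to_kanji : PySem.Dict String (List String)) with hetk
  have hnodup : etk.keys.Nodup := PySem.Dict.nodup_keys_ofList eng_to_kanji
  rw [outerLoop_items ktr etk etk.keys PySem.Dict.empty hnodup (by simp [PySem.Dict.keys_empty])]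
  rw [items_foldl_insert_fresh _ _ PySem.Dict.empty (by simpa [PySem.Dict.keys] using hnodup)
      (by simp [PySem.Dict.keys_empty])]
  have hempty : (PySem.Dict.empty : PySem.Dict String (List String)).items = [] := rfl
  rw [hempty, List.nil_append, List.nil_append]
  have hkeys : etk.keys = etk.items.map Prod.fst := by simp [PySem.Dict.keys]
  rw [hkeys, List.map_map]
  apply List.map_congr_left
  intro p hp
  simp only [Function.comp_apply]
  have hg : etk.getD p.1 [] = p.2 :=
    PySem.Dict.getD_of_mem_items etk (by simpa using hp) hnodup []
  rw [hg, wordVal_eq_uniq]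

-- ===== VERDICT (by name: the statement is the Claim_ definition above) =====
theorem create_eng_to_rads_spec : Claim_equal_create_eng_to_rads := by
  intro kanji_to_rads eng_to_kanji _
  exact main_eq kanji_to_rads eng_to_kanji
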